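-- pv_equiv track=rewrite | github.com/dmascardo/STEMboomerang | backend/main.py | guess_degree_and_school
-- ===== SOURCE A (Python) =====
-- from typing import Optional, List, Tuple, Dict, Any
--
-- def guess_degree_and_school(text: str) -> Tuple[Optional[str], Optional[str]]:
--     if not text:
--         return None, None
--
--     degree_keywords = ["bachelor", "b.sc", "bs", "b.s", "master", "m.sc", "ms", "m.s", "phd", "doctor", "associate"]
--     lines = [ln.strip() for ln in text.splitlines() if ln.strip()]
--
--     school = None
--     degree = None
--
--     for ln in lines[:160]:
--         low = ln.lower()
--         if not school and ("university" in low or "college" in low or "institute" in low):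
--             school = ln[:140].strip()
--         if not degree and any(k in low for k in degree_keywords):
--             degree = ln[:180].strip()
--         if school and degree:
--             break
--
--     return degree, school
-- ===== SOURCE B (Python) =====
-- def guess_degree_and_school(text):
--     if not text:
--         return None, None
--     lines = [ln.strip() for ln in text.splitlines() if ln.strip()][:160]
--     school = next((ln[:140].strip() for ln in lines
--                    if any(w in ln.lower() for w in ("university", "college", "institute"))), None)
--     degree_keywords = ("bachelor", "b.sc", "bs", "b.s", "master", "m.sc", "ms", "m.s", "phd", "doctor", "associate")
--     degree = next((ln[:180].strip() for ln in lines
--                    if any(k in ln.lower() for k in degree_keywords)), None)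
--     return degree, school
-- ===== Notes on version B (the rewrite author's own statement) =====
-- stated objective: simpler
-- what changed: A's single interleaved loop with two mutable slots and an early break is replaced by two independent first-match searches (next over a generator) on the same precomputed line slice.
import Mathlib
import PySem

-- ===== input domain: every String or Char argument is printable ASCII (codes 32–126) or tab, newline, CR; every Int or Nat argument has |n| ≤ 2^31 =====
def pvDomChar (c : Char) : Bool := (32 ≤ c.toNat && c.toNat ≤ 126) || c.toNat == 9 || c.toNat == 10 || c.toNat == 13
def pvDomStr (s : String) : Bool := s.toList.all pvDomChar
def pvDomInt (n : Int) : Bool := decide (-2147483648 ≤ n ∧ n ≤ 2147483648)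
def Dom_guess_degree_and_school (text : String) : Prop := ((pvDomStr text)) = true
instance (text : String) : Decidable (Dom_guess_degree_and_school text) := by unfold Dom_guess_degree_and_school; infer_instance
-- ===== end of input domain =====

-- B replaces A's single interleaved early-exiting loop by two independent first-match
-- searches over the same line slice (objective: simpler decomposition, same cost).

-- ===== PORT A =====
def pvDegKW : List String :=
  ["bachelor", "b.sc", "bs", "b.s", "master", "m.sc", "ms", "m.s", "phd", "doctor", "associate"]

-- Python truthiness of an Optional[str]: None and "" are falsy
def pvFalsy : Option String → Bool
  | none => true
  | some s => s == ""

-- the 'for ln in lines[:160]' loop of A, carrying (school, degree) and breaking early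
def pvLoopA : List String → Option String → Option String → Option String × Option String
  | [], school, degree => (degree, school)
  | ln :: rest, school, degree =>
    let low := PySem.Str.lower ln
    let school' :=
      if pvFalsy school &&
         (PySem.Str.isIn "university" low || PySem.Str.isIn "college" low ||
          PySem.Str.isIn "institute" low) then
        some (PySem.Str.strip (PySem.Str.slice ln none (some 140)))
      else school
    let degree' :=
      if pvFalsy degree && pvDegKW.any (fun k => PySem.Str.isIn k low) then
        some (PySem.Str.strip (PySem.Str.slice ln none (some 180)))
      else degree
    if !pvFalsy school' && !pvFalsy degree' then (degree', school')
    else pvLoopA rest school' degree'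

def guess_degree_and_school (text : String) : Option String × Option String :=
  if text = "" then (none, none)
  else
    let lines := (PySem.Str.splitlines text).filterMap (fun ln =>
      if PySem.Str.strip ln = "" then none else some (PySem.Str.strip ln))
    pvLoopA (PySem.List.slice lines none (some 160)) none none

-- ===== PORT B =====
def pvSchKW : List String := ["university", "college", "institute"]

def pvSchP (ln : String) : Bool := pvSchKW.any (fun w => PySem.Str.isIn w (PySem.Str.lower ln))

def pvDegP (ln : String) : Bool := pvDegKW.any (fun k => PySem.Str.isIn k (PySem.Str.lower ln))

def guess_degree_and_school_alt (text : String) : Option String × Option String :=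
  if text = "" then (none, none)
  else
    let lines := PySem.List.slice ((PySem.Str.splitlines text).filterMap (fun ln =>
      if PySem.Str.strip ln = "" then none else some (PySem.Str.strip ln))) none (some 160)
    let school := (lines.find? pvSchP).map
      (fun ln => PySem.Str.strip (PySem.Str.slice ln none (some 140)))
    let degree := (lines.find? pvDegP).map
      (fun ln => PySem.Str.strip (PySem.Str.slice ln none (some 180)))
    (degree, school)

-- ===== PRECONDITION & SPEC =====
def Spec_guess_degree_and_school (text : String) (out : Option String × Option String) : Prop := out = guess_degree_and_school_alt text
instance (text : String) (out : Option String × Option String) : Decidable (Spec_guess_degree_and_school text out) := by unfold Spec_guess_degree_and_school; infer_instance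

-- ===== CLAIM (what is proved, stated in full; the proofs are below) =====
def Claim_equal_guess_degree_and_school : Prop := ∀ (text : String), Dom_guess_degree_and_school text → Spec_guess_degree_and_school text (guess_degree_and_school text)

-- ===== LEMMAS AND PROOFS =====

-- head of a nonempty dropWhile fails the predicate
lemma pvDropWhileHead {p : Char → Bool} :
    ∀ (xs : List Char) (c : Char) (t : List Char), xs.dropWhile p = c :: t → p c = false := by
  intro xs
  induction xs with
  | nil => intro c t h; simp [List.dropWhile] at h
  | cons a as ih =>
    intro c t h
    by_cases hp : p a
    · rw [List.dropWhile_cons_of_pos hp] at h; exact ih c t h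
    · rw [List.dropWhile_cons_of_neg hp] at h
      cases h; simpa using hp

-- a nonempty stripped list starts with a non-space character
lemma pvStripHead (xs : List Char) (h : PySem.Chars.strip xs ≠ []) :
    ∃ c t, PySem.Chars.strip xs = c :: t ∧ PySem.Chars.isspace c = false := by
  cases he : PySem.Chars.strip xs with
  | nil => exact absurd he h
  | cons c t =>
    refine ⟨c, t, rfl, ?_⟩
    have hpre : PySem.Chars.strip xs <+: PySem.Chars.lstrip xs := by
      have hsfx : (PySem.Chars.lstrip xs).reverse.dropWhile PySem.Chars.isspace <:+
          (PySem.Chars.lstrip xs).reverse := List.dropWhile_suffix _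
      have h2 := List.reverse_prefix.mpr hsfx
      simpa [PySem.Chars.strip, PySem.Chars.rstrip] using h2
    rw [he] at hpre
    obtain ⟨t', ht'⟩ := hpre
    exact pvDropWhileHead xs c (t ++ t') (by simpa [PySem.Chars.lstrip] using ht'.symm)

-- a list starting with a non-space character strips to a nonempty list
lemma pvStripConsNe (c : Char) (t : List Char) (hc : PySem.Chars.isspace c = false) :
    PySem.Chars.strip (c :: t) ≠ [] := by
  intro h
  have hnc : ¬ (PySem.Chars.isspace c = true) := by simp [hc]
  have hl : PySem.Chars.lstrip (c :: t) = c :: t := by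
    simp [PySem.Chars.lstrip, List.dropWhile_cons_of_neg hnc]
  rw [PySem.Chars.strip, hl, PySem.Chars.rstrip, List.reverse_eq_nil_iff,
    List.dropWhile_eq_nil_iff] at h
  have := h c (by simp)
  rw [hc] at this
  exact Bool.false_ne_true this

-- stripping a positive-length prefix of a nonempty stripped list is nonempty
lemma pvStripTake (xs : List Char) (n : Nat) (hn : 0 < n) (h : PySem.Chars.strip xs ≠ []) :
    PySem.Chars.strip ((PySem.Chars.strip xs).take n) ≠ [] := by
  obtain ⟨c, t, he, hc⟩ := pvStripHead xs h
  rw [he]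
  cases n with
  | zero => omega
  | succ m => rw [List.take_succ_cons]; exact pvStripConsNe c (t.take m) hc

-- Str-level: '(x.strip())[:n].strip()' is truthy when 'x.strip()' is
lemma pvStrKey (x : String) (n : Int) (hn : 0 < n) (hx : PySem.Str.strip x ≠ "") :
    PySem.Str.strip (PySem.Str.slice (PySem.Str.strip x) none (some n)) ≠ "" := by
  intro h
  have hx' : PySem.Chars.strip x.toList ≠ [] := by
    intro h0
    apply hx
    simp [PySem.Str.strip, h0]
  have h' : PySem.Chars.strip ((PySem.Chars.strip x.toList).take n.toNat) = [] := by
    have := congrArg String.toList h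
    simpa [PySem.Str.strip, PySem.Str.slice, PySem.Chars.slice_eq_listSlice,
      PySem.List.slice_to _ (le_of_lt hn)] using this
  exact pvStripTake x.toList n.toNat (by omega) hx' h'

-- the interleaved early-exit loop equals two independent first-match searches,
-- provided no state or produced value is the falsy string ""
lemma pvLoopA_eq (lines : List String) (school degree : Option String)
    (hl : ∀ ln ∈ lines,
      PySem.Str.strip (PySem.Str.slice ln none (some 140)) ≠ "" ∧
      PySem.Str.strip (PySem.Str.slice ln none (some 180)) ≠ "")
    (hs : school ≠ some "") (hd : degree ≠ some "") :
    pvLoopA lines school degree =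
      (degree.or ((lines.find? pvDegP).map
          (fun ln => PySem.Str.strip (PySem.Str.slice ln none (some 180)))),
       school.or ((lines.find? pvSchP).map
          (fun ln => PySem.Str.strip (PySem.Str.slice ln none (some 140))))) := by
  induction lines generalizing school degree with
  | nil => cases school <;> cases degree <;> simp [pvLoopA]
  | cons ln rest ih =>
    obtain ⟨h140, h180⟩ := hl ln (List.mem_cons_self ..)
    have hrest : ∀ l ∈ rest,
        PySem.Str.strip (PySem.Str.slice l none (some 140)) ≠ "" ∧
        PySem.Str.strip (PySem.Str.slice l none (some 180)) ≠ "" :=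
      fun l hm => hl l (List.mem_cons_of_mem _ hm)
    have hsch : (PySem.Str.isIn "university" (PySem.Str.lower ln) ||
        PySem.Str.isIn "college" (PySem.Str.lower ln) ||
        PySem.Str.isIn "institute" (PySem.Str.lower ln)) = pvSchP ln := by
      simp [pvSchP, pvSchKW, Bool.or_assoc]
    have hdeg : pvDegKW.any (fun k => PySem.Str.isIn k (PySem.Str.lower ln)) = pvDegP ln := rfl
    have hss : (some (PySem.Str.strip (PySem.Str.slice ln none (some 140))) : Option String) ≠ some "" := by
      simpa using h140
    have hds : (some (PySem.Str.strip (PySem.Str.slice ln none (some 180))) : Option String) ≠ some "" := by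
      simpa using h180
    cases school with
    | some s =>
      have hs' : s ≠ "" := fun h => hs (by rw [h])
      cases degree with
      | some d =>
        have hd' : d ≠ "" := fun h => hd (by rw [h])
        simp [pvLoopA, pvFalsy, hs', hd']
      | none =>
        simp only [pvLoopA, pvFalsy, hsch, hdeg, Bool.true_and]
        by_cases hD : pvDegP ln = true
        · simp [hD, hs', h180, List.find?_cons_of_pos (l := rest) hD]
        · simp only [Bool.not_eq_true] at hD
          have hD' : ¬ pvDegP ln = true := by simp [hD]
          simp [hD, hs', ih _ _ hrest hs hd, List.find?_cons_of_neg hD']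
    | none =>
      cases degree with
      | some d =>
        have hd' : d ≠ "" := fun h => hd (by rw [h])
        simp only [pvLoopA, pvFalsy, hsch, hdeg, Bool.true_and]
        by_cases hS : pvSchP ln = true
        · simp [hS, hd', h140, List.find?_cons_of_pos (l := rest) hS]
        · simp only [Bool.not_eq_true] at hS
          have hS' : ¬ pvSchP ln = true := by simp [hS]
          simp [hS, hd', ih _ _ hrest hs hd, List.find?_cons_of_neg hS']
      | none =>
        simp only [pvLoopA, pvFalsy, hsch, hdeg, Bool.true_and]
        by_cases hS : pvSchP ln = true <;> by_cases hD : pvDegP ln = true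
        · simp [hS, hD, h140, h180, List.find?_cons_of_pos (l := rest) hS,
            List.find?_cons_of_pos (l := rest) hD]
        · simp only [Bool.not_eq_true] at hD
          have hD' : ¬ pvDegP ln = true := by simp [hD]
          simp [hS, hD, ih _ _ hrest hss hd,
            List.find?_cons_of_pos (l := rest) hS, List.find?_cons_of_neg hD']
        · simp only [Bool.not_eq_true] at hS
          have hS' : ¬ pvSchP ln = true := by simp [hS]
          simp [hS, hD, ih _ _ hrest hs hds,
            List.find?_cons_of_neg hS', List.find?_cons_of_pos (l := rest) hD]
        · simp only [Bool.not_eq_true] at hS hD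
          have hS' : ¬ pvSchP ln = true := by simp [hS]
          have hD' : ¬ pvDegP ln = true := by simp [hD]
          simp [hS, hD, ih _ _ hrest hs hd,
            List.find?_cons_of_neg hS', List.find?_cons_of_neg hD']

-- ===== VERDICT (by name: the statement is the Claim_ definition above) =====
theorem guess_degree_and_school_spec : Claim_equal_guess_degree_and_school := by
  intro text _
  unfold Spec_guess_degree_and_school guess_degree_and_school guess_degree_and_school_alt
  by_cases ht : text = ""
  · simp [ht]
  · simp only [ht, if_false]
    have hl : ∀ ln ∈ PySem.List.slice ((PySem.Str.splitlines text).filterMap (fun ln =>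
        if PySem.Str.strip ln = "" then none else some (PySem.Str.strip ln))) none (some 160),
        PySem.Str.strip (PySem.Str.slice ln none (some 140)) ≠ "" ∧
        PySem.Str.strip (PySem.Str.slice ln none (some 180)) ≠ "" := by
      intro ln hln
      have hmem := PySem.List.mem_of_mem_slice _ _ _ hln
      obtain ⟨x, _, hx⟩ := List.mem_filterMap.mp hmem
      by_cases hx0 : PySem.Str.strip x = ""
      · simp [hx0] at hx
      · simp only [hx0, if_false, Option.some.injEq] at hx
        subst hx
        exact ⟨pvStrKey x 140 (by norm_num) hx0, pvStrKey x 180 (by norm_num) hx0⟩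
    rw [pvLoopA_eq _ none none hl (by simp) (by simp)]
    simp [Option.none_or]
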